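-- pv_equiv track=rewrite | github.com/wongdigital/taxonomy-generator | apply_tags.py | update_frontmatter_tags
-- ===== SOURCE A (Python) =====
-- from typing import Dict, List, Optional, Union, Set, Any
--
-- def update_frontmatter_tags(frontmatter: Optional[str], tags: List[str]) -> str:
--     """Update or add tags in frontmatter.
--
--     Args:
--         frontmatter: Existing frontmatter content or None
--         tags: List of tags to apply
--
--     Returns:
--         Updated frontmatter content
--     """
--     if frontmatter is None:
--         return f"tags:\n  - " + "\n  - ".join(tags)
--
--     # Remove existing tags section if present
--     lines = frontmatter.split('\n')
--     new_lines = []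
--     skip_mode = False
--
--     for line in lines:
--         if line.strip().startswith('tags:'):
--             skip_mode = True
--             continue
--         if skip_mode and line.strip().startswith('-'):
--             continue
--         if skip_mode and not line.strip().startswith('-'):
--             skip_mode = False
--         if not skip_mode:
--             new_lines.append(line)
--
--     # Add new tags section
--     new_frontmatter = '\n'.join(new_lines).strip()
--     if new_frontmatter:
--         new_frontmatter += '\n'
--     new_frontmatter += f"tags:\n  - " + "\n  - ".join(tags)
--
--     return new_frontmatter
-- ===== SOURCE B (Python) =====
-- def update_frontmatter_tags(frontmatter, tags):
--     """Declarative per-line filter: each line is classified independently by a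
--     backward scan over its predecessors (no state carried through the pass)."""
--     if frontmatter is None:
--         return "tags:\n  - " + "\n  - ".join(tags)
--
--     lines = frontmatter.split('\n')
--
--     def dropped(i):
--         s = lines[i].strip()
--         if s.startswith('tags:'):
--             return True
--         if not s.startswith('-'):
--             return False
--         before = lines[:i][::-1]
--         while before and before[0].strip().startswith('-'):
--             before = before[1:]
--         return bool(before) and before[0].strip().startswith('tags:')
--
--     kept = [lines[i] for i in range(len(lines)) if not dropped(i)]
--     body = '\n'.join(kept).strip()
--     if body:
--         body += '\n'
--     return body + "tags:\n  - " + "\n  - ".join(tags)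
-- ===== Notes on version B (the rewrite author's own statement) =====
-- stated objective: alternative
-- what changed: Replaces A's stateful forward pass carrying a skip_mode flag with a stateless per-line filter: each line is classified independently by a backward scan over its predecessors (drop a dash line iff its nearest non-dash predecessor is a 'tags:' header), then the kept lines are joined.
import Mathlib
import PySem

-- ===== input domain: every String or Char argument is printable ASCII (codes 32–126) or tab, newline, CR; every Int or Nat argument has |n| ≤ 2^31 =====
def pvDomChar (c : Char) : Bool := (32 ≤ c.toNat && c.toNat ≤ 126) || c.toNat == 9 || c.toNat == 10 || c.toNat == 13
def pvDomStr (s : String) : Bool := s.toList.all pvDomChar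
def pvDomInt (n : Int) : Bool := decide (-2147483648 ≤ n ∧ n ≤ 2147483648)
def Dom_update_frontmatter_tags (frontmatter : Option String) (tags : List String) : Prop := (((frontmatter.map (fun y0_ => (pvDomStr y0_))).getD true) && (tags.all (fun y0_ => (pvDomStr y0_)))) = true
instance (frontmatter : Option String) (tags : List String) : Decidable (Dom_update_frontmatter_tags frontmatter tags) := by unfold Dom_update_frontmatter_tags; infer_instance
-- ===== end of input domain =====

-- B replaces A's stateful forward pass (skip_mode flag) by a stateless per-line filter:
-- each line is classified independently by a backward scan over its predecessors
-- (objective: alternative algorithm, O(n^2) worst case vs A's O(n)).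

-- ===== PORT A =====
-- A's loop body: state = (new_lines, skip_mode)
def aStep (st : List String × Bool) (line : String) : List String × Bool :=
  if PySem.Str.startswith (PySem.Str.strip line) "tags:" then (st.1, true)
  else if st.2 && PySem.Str.startswith (PySem.Str.strip line) "-" then (st.1, st.2)
  else (st.1 ++ [line], false)

def update_frontmatter_tags (frontmatter : Option String) (tags : List String) : String :=
  match frontmatter with
  | none => "tags:\n  - " ++ PySem.Str.join "\n  - " tags
  | some fm =>
    let lines := (PySem.Chars.splitOn fm.toList ['\n']).map String.ofList
    let newLines := (lines.foldl aStep ([], false)).1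
    let nf := PySem.Str.strip (PySem.Str.join "\n" newLines)
    let nf := if nf = "" then nf else nf ++ "\n"
    nf ++ ("tags:\n  - " ++ PySem.Str.join "\n  - " tags)

-- ===== PORT B =====
def isDashLine (l : String) : Bool := PySem.Str.startswith (PySem.Str.strip l) "-"
def isTagsLine (l : String) : Bool := PySem.Str.startswith (PySem.Str.strip l) "tags:"

-- Source B's `dropped(i)`: the backward `while` over `before` is the dropWhile on the reversed prefix
def droppedB (lines : List String) (i : Nat) : Bool :=
  let l := lines.getD i ""
  if isTagsLine l then true
  else if !isDashLine l then false
  else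
    match ((lines.take i).reverse).dropWhile isDashLine with
    | [] => false
    | p :: _ => isTagsLine p

def update_frontmatter_tags_alt (frontmatter : Option String) (tags : List String) : String :=
  match frontmatter with
  | none => "tags:\n  - " ++ PySem.Str.join "\n  - " tags
  | some fm =>
    let lines := (PySem.Chars.splitOn fm.toList ['\n']).map String.ofList
    let kept := ((List.range lines.length).filter (fun i => !droppedB lines i)).map
      (fun i => lines.getD i "")
    let body := PySem.Str.strip (PySem.Str.join "\n" kept)
    let body := if body = "" then body else body ++ "\n"
    body ++ ("tags:\n  - " ++ PySem.Str.join "\n  - " tags)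

-- ===== PRECONDITION & SPEC =====
def Spec_update_frontmatter_tags (frontmatter : Option String) (tags : List String) (out : String) : Prop := out = update_frontmatter_tags_alt frontmatter tags
instance (frontmatter : Option String) (tags : List String) (out : String) : Decidable (Spec_update_frontmatter_tags frontmatter tags out) := by unfold Spec_update_frontmatter_tags; infer_instance

-- ===== CLAIM (what is proved, stated in full; the proofs are below) =====
def Claim_equal_update_frontmatter_tags : Prop := ∀ (frontmatter : Option String) (tags : List String), Dom_update_frontmatter_tags frontmatter tags → Spec_update_frontmatter_tags frontmatter tags (update_frontmatter_tags frontmatter tags)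

-- ===== LEMMAS AND PROOFS =====

-- reference recursion both sides are reduced to: scanF c lines keeps exactly the lines
-- A's flag c keeps / B's backward scan classifies as kept
def scanF (c : Bool) : List String → List String
  | [] => []
  | l :: rest =>
      (if isTagsLine l || (c && isDashLine l) then [] else [l]) ++
      scanF (if isDashLine l then c else isTagsLine l) rest

-- a line whose strip starts with "tags:" does not start with "-"
theorem tags_not_dash (l : String) (h : isTagsLine l = true) : isDashLine l = false := by
  unfold isTagsLine at h
  unfold isDashLine
  simp only [PySem.Str.startswith_eq] at h ⊢
  rw [PySem.Chars.startswith_iff] at h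
  by_contra hd
  rw [Bool.not_eq_false, PySem.Chars.startswith_iff] at hd
  obtain ⟨t1, h1⟩ := h
  obtain ⟨t2, h2⟩ := hd
  rw [← h1] at h2
  rw [show ("tags:".toList) = ['t','a','g','s',':'] from by decide,
      show ("-".toList) = ['-'] from by decide] at h2
  simp at h2

-- aStep written with the B-side line classifiers
theorem aStep_eq (acc : List String) (b : Bool) (l : String) :
    aStep (acc, b) l =
      if isTagsLine l then (acc, true)
      else if b && isDashLine l then (acc, b)
      else (acc ++ [l], false) := rfl

-- A's fold computes scanF
theorem foldA_eq_scanF (lines : List String) :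
    ∀ (acc : List String) (b : Bool), (lines.foldl aStep (acc, b)).1 = acc ++ scanF b lines := by
  induction lines with
  | nil => intro acc b; simp [scanF]
  | cons l rest ih =>
    intro acc b
    rw [List.foldl_cons, aStep_eq, scanF]
    cases ht : isTagsLine l with
    | true =>
      have hd := tags_not_dash l ht
      simp only [hd, if_true, Bool.true_or, Bool.and_false, ih]
      simp
    | false =>
      cases hd : isDashLine l with
      | true =>
        cases b with
        | true => simp only [Bool.and_true, if_true, ih]; simp
        | false => simp only [Bool.and_true, if_true, ih]; simp
      | false =>
        simp only [Bool.and_false, ih]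
        simp

-- droppedB with an explicit context for when the backward scan falls off the front
def droppedCtx (c : Bool) (lines : List String) (i : Nat) : Bool :=
  let l := lines.getD i ""
  if isTagsLine l then true
  else if !isDashLine l then false
  else
    match ((lines.take i).reverse).dropWhile isDashLine with
    | [] => c
    | p :: _ => isTagsLine p

theorem droppedB_eq_ctx (lines : List String) (i : Nat) :
    droppedB lines i = droppedCtx false lines i := by
  unfold droppedB droppedCtx
  rfl

-- shifting one line off the front updates the context
theorem droppedCtx_succ (c : Bool) (l : String) (rest : List String) (i : Nat) :
    droppedCtx c (l :: rest) (i + 1)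
      = droppedCtx (if isDashLine l then c else isTagsLine l) rest i := by
  unfold droppedCtx
  simp only [List.getD, List.getElem?_cons_succ, List.take_succ_cons, List.reverse_cons,
    List.dropWhile_append]
  cases hD : List.dropWhile isDashLine (List.take i rest).reverse with
  | nil =>
    simp only [List.isEmpty_nil, if_true, List.dropWhile]
    cases hd : isDashLine l <;> simp
  | cons p tl => simp

-- B's index filter computes scanF
theorem filterB_eq_scanF (lines : List String) :
    ∀ c : Bool,
      ((List.range lines.length).filter (fun i => !droppedCtx c lines i)).map
        (fun i => lines.getD i "") = scanF c lines := by
  induction lines with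
  | nil => intro c; simp [scanF]
  | cons l rest ih =>
    intro c
    have h0 : droppedCtx c (l :: rest) 0 = (isTagsLine l || (c && isDashLine l)) := by
      unfold droppedCtx
      cases ht : isTagsLine l <;> cases hd : isDashLine l <;> cases c <;> simp [ht, hd]
    have htail :
        (List.filter ((fun i => !droppedCtx c (l :: rest) i) ∘ Nat.succ)
            (List.range rest.length)).map
          ((fun i => (l :: rest).getD i "") ∘ Nat.succ)
        = scanF (if isDashLine l then c else isTagsLine l) rest := by
      have hp : ((fun i => !droppedCtx c (l :: rest) i) ∘ Nat.succ)
          = (fun i => !droppedCtx (if isDashLine l then c else isTagsLine l) rest i) := by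
        funext i
        simp only [Function.comp_apply]
        rw [show Nat.succ i = i + 1 from rfl, droppedCtx_succ]
      have hf : ((fun i => (l :: rest).getD i "") ∘ Nat.succ) = (fun i => rest.getD i "") := by
        funext i
        simp [Function.comp, List.getD]
      rw [hp, hf, ih]
    rw [List.length_cons, List.range_succ_eq_map, List.filter_cons, scanF, h0,
        List.filter_map]
    cases htot : (isTagsLine l || (c && isDashLine l)) with
    | true =>
      simp only [Bool.not_true, Bool.false_eq_true, if_false, List.map_map, htail]
      simp
    | false =>
      simp only [Bool.not_false, if_true, List.map_cons, List.map_map, htail]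
      simp [List.getD]

-- ===== VERDICT (by name: the statement is the Claim_ definition above) =====
theorem update_frontmatter_tags_spec : Claim_equal_update_frontmatter_tags := by
  intro frontmatter tags _
  unfold Spec_update_frontmatter_tags update_frontmatter_tags update_frontmatter_tags_alt
  cases frontmatter with
  | none => rfl
  | some fm =>
    simp only
    rw [foldA_eq_scanF, List.nil_append]
    have := filterB_eq_scanF ((PySem.Chars.splitOn fm.toList ['\n']).map String.ofList) false
    simp only [droppedB_eq_ctx]
    rw [this]
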